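-- pv_equiv track=rewrite | github.com/Karpman-Consulting/eQUEST-229RPDGenerator | rpd_generator/utilities/schedule_funcs.py | generate_year_calendar
-- ===== SOURCE A (Python) =====
-- def is_leap_year(year: int) -> bool:
--     """
--     Determine if a year is a leap year.
--     :param year:
--     :return: True/False boolean
--     """
--     return (year % 4 == 0 and year % 100 != 0) or (year % 400 == 0)
--
-- def generate_year_calendar(year: int, first_day: str) -> dict:
--     """
--     Generate a dictionary of days in a year with day types.
--     :param year:
--     :param first_day:
--     :return: dictionary of days in a year with day types
--     """
--     first_day = [
--         "MONDAY",
--         "TUESDAY",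
--         "WEDNESDAY",
--         "THURSDAY",
--         "FRIDAY",
--         "SATURDAY",
--         "SUNDAY",
--     ].index(first_day) + 1
--     day_types_365 = {}
--     day_types = [7, 1, 2, 3, 4, 5, 6]
--     day_type = None
--
--     month_days = [
--         31,
--         28 if not is_leap_year(year) else 29,
--         31,
--         30,
--         31,
--         30,
--         31,
--         31,
--         30,
--         31,
--         30,
--         31,
--     ]
--     m = 0
--     d = 1
--
--     days_left_in_month = month_days[m]
--
--     for i in range(366 if is_leap_year(year) else 365):
--         days_left_in_month -= 1
--
--         day_type = day_types[(i + first_day) % 7]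
--
--         day_types_365[f"{m+1}/{d}"] = day_type
--
--         if days_left_in_month > 0:
--             d += 1
--         else:
--             m += 1
--             d = 1
--             if m < 12:
--                 days_left_in_month = month_days[m]
--
--     return day_types_365
-- ===== SOURCE B (Python) =====
-- def generate_year_calendar(year: int, first_day: str) -> dict:
--     offset = [
--         "MONDAY",
--         "TUESDAY",
--         "WEDNESDAY",
--         "THURSDAY",
--         "FRIDAY",
--         "SATURDAY",
--         "SUNDAY",
--     ].index(first_day) + 1
--     leap = (year % 4 == 0 and year % 100 != 0) or (year % 400 == 0)
--     month_days = [31, 29 if leap else 28, 31, 30, 31, 30, 31, 31, 30, 31, 30, 31]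
--     day_types = [7, 1, 2, 3, 4, 5, 6]
--     cal = {}
--     i = 0
--     for m, nd in enumerate(month_days):
--         for d in range(1, nd + 1):
--             cal[f"{m + 1}/{d}"] = day_types[(i + offset) % 7]
--             i += 1
--     return cal
-- ===== Notes on version B (the rewrite author's own statement) =====
-- stated objective: simpler
-- what changed: Replaces A's flat 365/366-iteration loop with hand-maintained month/day/days-left rollover state by two nested loops (months, then days of that month) with a single running day index, dropping the rollover branch entirely.
import Mathlib
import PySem

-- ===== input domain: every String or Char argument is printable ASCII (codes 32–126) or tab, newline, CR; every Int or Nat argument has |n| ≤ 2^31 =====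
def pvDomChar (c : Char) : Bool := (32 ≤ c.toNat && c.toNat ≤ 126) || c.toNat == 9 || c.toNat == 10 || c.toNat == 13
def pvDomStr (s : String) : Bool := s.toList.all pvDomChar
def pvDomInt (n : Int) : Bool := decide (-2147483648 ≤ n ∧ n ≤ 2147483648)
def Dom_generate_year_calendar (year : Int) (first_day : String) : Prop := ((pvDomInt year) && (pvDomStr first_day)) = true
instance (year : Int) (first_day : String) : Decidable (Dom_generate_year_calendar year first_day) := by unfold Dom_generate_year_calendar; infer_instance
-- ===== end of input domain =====

-- B replaces A's flat 365/366-step loop with hand-maintained month/day/days-left rollover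
-- state by two nested loops (months, then days) with a running day index (simpler decomposition).


-- ===== PORT A =====
def is_leap_year (year : Int) : Bool :=
  (PySem.Int.mod year 4 == 0 && PySem.Int.mod year 100 != 0) || PySem.Int.mod year 400 == 0

-- the body of A's `for i in range(...)` loop (state: m, d, days_left_in_month, day_types_365)
def stepA (month_days : List Int) (first_day : Int)
    (st : Int × Int × Int × PySem.Dict String Int) (i : Int) :
    Int × Int × Int × PySem.Dict String Int :=
  let m := st.1
  let d := st.2.1
  let days_left := st.2.2.1 - 1
  let day_types : List Int := [7, 1, 2, 3, 4, 5, 6]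
  let day_type := PySem.List.pyGetD day_types (PySem.Int.mod (i + first_day) 7) 0
  let dict := st.2.2.2.insert (PySem.Int.toStr (m + 1) ++ "/" ++ PySem.Int.toStr d) day_type
  if days_left > 0 then
    (m, d + 1, days_left, dict)
  else
    (m + 1, 1, if m + 1 < 12 then PySem.List.pyGetD month_days (m + 1) 0 else days_left, dict)

-- the whole `for i in range(...)` loop of A, returning the finished dict's items
def runA (month_days : List Int) (first_day : Int) (n : Int) : List (String × Int) :=
  let fin :=
    (PySem.List.pyRange 0 n 1).foldl (stepA month_days first_day)
      ((0 : Int), (1 : Int), PySem.List.pyGetD month_days 0 0,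
        (PySem.Dict.empty : PySem.Dict String Int))
  fin.2.2.2.items

def generate_year_calendar (year : Int) (first_day : String) : List (String × Int) :=
  match PySem.List.index?
      ["MONDAY", "TUESDAY", "WEDNESDAY", "THURSDAY", "FRIDAY", "SATURDAY", "SUNDAY"]
      first_day with
  | none => []  -- Python raises ValueError here; excluded by Pre_
  | some k =>
    runA [31, if !(is_leap_year year) then 28 else 29, 31, 30, 31, 30, 31, 31, 30, 31, 30, 31]
      ((k : Int) + 1) (if is_leap_year year then 366 else 365)

-- ===== PORT B =====
-- the body of B's inner `for d in range(1, nd + 1)` loop (state: running day index i, cal)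
def stepBinner (m offset : Int) (st : Int × PySem.Dict String Int) (d : Int) :
    Int × PySem.Dict String Int :=
  (st.1 + 1,
    st.2.insert (PySem.Int.toStr (m + 1) ++ "/" ++ PySem.Int.toStr d)
      (PySem.List.pyGetD [7, 1, 2, 3, 4, 5, 6] (PySem.Int.mod (st.1 + offset) 7) 0))

-- the body of B's outer `for m, nd in enumerate(month_days)` loop
def stepB (offset : Int) (st : Int × PySem.Dict String Int) (p : Int × Int) :
    Int × PySem.Dict String Int :=
  (PySem.List.pyRange 1 (p.2 + 1) 1).foldl (stepBinner p.1 offset) st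

-- the whole nested month/day loop of B, returning the finished dict's items
def runB (month_days : List Int) (offset : Int) : List (String × Int) :=
  let fin :=
    (PySem.List.enumerate month_days 0).foldl (stepB offset)
      ((0 : Int), (PySem.Dict.empty : PySem.Dict String Int))
  fin.2.items

def generate_year_calendar_alt (year : Int) (first_day : String) : List (String × Int) :=
  match PySem.List.index?
      ["MONDAY", "TUESDAY", "WEDNESDAY", "THURSDAY", "FRIDAY", "SATURDAY", "SUNDAY"]
      first_day with
  | none => []  -- Python raises ValueError here; excluded by Pre_
  | some k =>
    runB [31, if is_leap_year year then 29 else 28, 31, 30, 31, 30, 31, 31, 30, 31, 30, 31]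
      ((k : Int) + 1)

-- ===== PRECONDITION & SPEC =====
-- Pre_ excludes exactly the inputs on which A's list.index(first_day) raises ValueError.
def Pre_generate_year_calendar (year : Int) (first_day : String) : Prop :=
  first_day ∈ ["MONDAY", "TUESDAY", "WEDNESDAY", "THURSDAY", "FRIDAY", "SATURDAY", "SUNDAY"]
instance (year : Int) (first_day : String) : Decidable (Pre_generate_year_calendar year first_day) := by
  unfold Pre_generate_year_calendar; infer_instance

def pvWitness_generate_year_calendar : Int × String := (2024, "WEDNESDAY")

def Spec_generate_year_calendar (year : Int) (first_day : String) (out : List (String × Int)) : Prop := out = generate_year_calendar_alt year first_day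
instance (year : Int) (first_day : String) (out : List (String × Int)) : Decidable (Spec_generate_year_calendar year first_day out) := by unfold Spec_generate_year_calendar; infer_instance

-- ===== CLAIM (what is proved, stated in full; the proofs are below) =====
def Claim_equal_generate_year_calendar : Prop := ∀ (year : Int) (first_day : String), Dom_generate_year_calendar year first_day → Pre_generate_year_calendar year first_day → Spec_generate_year_calendar year first_day (generate_year_calendar year first_day)

-- ===== LEMMAS AND PROOFS =====

-- B's inner loop advances the running day index by the number of days processed.
lemma counterB (m off : Int) (l : List Int) :
    ∀ (i0 : Int) (dict : PySem.Dict String Int),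
      (l.foldl (stepBinner m off) (i0, dict)).1 = i0 + l.length := by
  induction l with
  | nil => intro i0 dict; simp
  | cons x xs ih =>
    intro i0 dict
    simp only [List.foldl_cons, stepBinner, List.length_cons]
    rw [ih]
    push_cast
    ring

-- One month of A's loop (c+1 days) equals B's inner loop over the same days,
-- leaving A in the start-of-next-month state.
lemma innerAgree (md : List Int) (off : Int) :
    ∀ (c : Nat) (m dcur i0 : Int) (dict : PySem.Dict String Int),
      (PySem.List.pyRange i0 (i0 + ((c : Int) + 1)) 1).foldl (stepA md off)
          (m, dcur, ((c : Int) + 1), dict)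
        = (m + 1, 1,
            (if m + 1 < 12 then PySem.List.pyGetD md (m + 1) 0 else (0 : Int)),
            ((PySem.List.pyRange dcur (dcur + ((c : Int) + 1)) 1).foldl (stepBinner m off)
                (i0, dict)).2) := by
  intro c
  induction c with
  | zero =>
    intro m dcur i0 dict
    rw [show ((0 : Nat) : Int) + 1 = 1 by norm_num]
    rw [PySem.List.pyRange_one_singleton, PySem.List.pyRange_one_singleton]
    simp [stepA, stepBinner]
  | succ n ih =>
    intro m dcur i0 dict
    rw [PySem.List.pyRange_one_cons (by push_cast; omega : i0 < i0 + (((n + 1 : Nat) : Int) + 1)),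
        PySem.List.pyRange_one_cons (by push_cast; omega : dcur < dcur + (((n + 1 : Nat) : Int) + 1))]
    simp only [List.foldl_cons]
    have hstep : stepA md off (m, dcur, (((n + 1 : Nat) : Int) + 1), dict) i0
        = (m, dcur + 1, ((n : Int) + 1),
            (stepBinner m off (i0, dict) dcur).2) := by
      simp only [stepA, stepBinner]
      rw [if_pos (by push_cast; omega : (((n + 1 : Nat) : Int) + 1) - 1 > 0)]
      push_cast
      ring_nf
    rw [hstep]
    have he1 : i0 + (((n + 1 : Nat) : Int) + 1) = (i0 + 1) + ((n : Int) + 1) := by push_cast; ring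
    have he2 : dcur + (((n + 1 : Nat) : Int) + 1) = (dcur + 1) + ((n : Int) + 1) := by
      push_cast; ring
    rw [he1, he2]
    have hfst : (stepBinner m off (i0, dict) dcur).1 = i0 + 1 := by simp [stepBinner]
    calc (PySem.List.pyRange (i0 + 1) (i0 + 1 + ((n : Int) + 1)) 1).foldl (stepA md off)
            (m, dcur + 1, ((n : Int) + 1), (stepBinner m off (i0, dict) dcur).2)
        = (m + 1, 1, (if m + 1 < 12 then PySem.List.pyGetD md (m + 1) 0 else (0 : Int)),
            ((PySem.List.pyRange (dcur + 1) (dcur + 1 + ((n : Int) + 1)) 1).foldl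
                (stepBinner m off) (i0 + 1, (stepBinner m off (i0, dict) dcur).2)).2) :=
          ih m (dcur + 1) (i0 + 1) (stepBinner m off (i0, dict) dcur).2
      _ = (m + 1, 1, (if m + 1 < 12 then PySem.List.pyGetD md (m + 1) 0 else (0 : Int)),
            ((PySem.List.pyRange (dcur + 1) (dcur + 1 + ((n : Int) + 1)) 1).foldl
                (stepBinner m off) (stepBinner m off (i0, dict) dcur)).2) := by
          rw [show (i0 + 1, (stepBinner m off (i0, dict) dcur).2)
              = stepBinner m off (i0, dict) dcur from (Prod.ext hfst rfl).symm]

-- The whole remaining run of A's loop (months mIdx.. of md) equals B's outer loop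
-- over enumerate of the remaining month lengths.
lemma outerAgree (md : List Int) (off : Int) (hlen : md.length = 12)
    (hpos : ∀ x ∈ md, 1 ≤ x) :
    ∀ (rest : List Int) (mIdx : Nat) (i0 : Int) (dict : PySem.Dict String Int),
      md.drop mIdx = rest →
      ((PySem.List.pyRange i0 (i0 + rest.sum) 1).foldl (stepA md off)
          ((mIdx : Int), 1, PySem.List.pyGetD md ((mIdx : Nat) : Int) 0, dict)).2.2.2
        = ((PySem.List.enumerate rest ((mIdx : Nat) : Int)).foldl (stepB off) (i0, dict)).2 := by
  intro rest
  induction rest with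
  | nil =>
    intro mIdx i0 dict _
    rw [show i0 + ([] : List Int).sum = i0 by simp]
    rw [PySem.List.pyRange_one_eq_nil le_rfl]
    simp [PySem.List.enumerate]
  | cons nd rest2 ih =>
    intro mIdx i0 dict hdrop
    have hmlt : mIdx < md.length := by
      by_contra h
      rw [List.drop_eq_nil_of_le (by omega)] at hdrop
      exact (List.cons_ne_nil nd rest2) hdrop.symm
    have hcons := List.drop_eq_getElem_cons hmlt
    rw [hdrop] at hcons
    have hnd : md[mIdx] = nd := by injection hcons with h1 _; exact h1.symm
    have hrest2 : md.drop (mIdx + 1) = rest2 := by injection hcons with _ h2; exact h2.symm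
    have hnd1 : 1 ≤ nd := hnd ▸ hpos md[mIdx] (List.getElem_mem hmlt)
    obtain ⟨c, hc⟩ : ∃ c : Nat, nd = (c : Int) + 1 := ⟨(nd - 1).toNat, by omega⟩
    subst hc
    have hsum2 : 0 ≤ rest2.sum := by
      apply List.sum_nonneg
      intro x hx
      have : x ∈ md := List.drop_subset (mIdx + 1) md (hrest2 ▸ hx)
      linarith [hpos x this]
    have hget : PySem.List.pyGetD md ((mIdx : Nat) : Int) 0 = (c : Int) + 1 := by
      rw [PySem.List.pyGetD_natCast, List.getD_eq_getElem md 0 hmlt, hnd]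
    -- split A's range at the end of month mIdx
    rw [List.sum_cons,
        PySem.List.pyRange_one_append i0 (i0 + ((c : Int) + 1))
          (i0 + (((c : Int) + 1) + rest2.sum)) (by omega) (by omega),
        List.foldl_append, hget,
        innerAgree md off c ((mIdx : Nat) : Int) 1 i0 dict]
    -- collapse the rollover `if` into the uniform start-of-month form
    have hcollapse :
        (if ((mIdx : Nat) : Int) + 1 < 12 then PySem.List.pyGetD md (((mIdx : Nat) : Int) + 1) 0
         else (0 : Int))
          = PySem.List.pyGetD md (((mIdx + 1 : Nat) : Nat) : Int) 0 := by
      by_cases h : ((mIdx : Nat) : Int) + 1 < 12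
      · rw [if_pos h]
        norm_cast
      · rw [if_neg h]
        push_cast at h
        rw [PySem.List.pyGetD_natCast, List.getD_eq_default md 0 (by omega)]
    rw [hcollapse,
        show ((mIdx : Nat) : Int) + 1 = (((mIdx + 1 : Nat) : Nat) : Int) by push_cast; ring]
    -- B's first month step
    have hBmonth : stepB off (i0, dict) (((mIdx : Nat) : Int), (c : Int) + 1)
        = (i0 + ((c : Int) + 1),
            ((PySem.List.pyRange 1 (1 + ((c : Int) + 1)) 1).foldl
                (stepBinner ((mIdx : Nat) : Int) off) (i0, dict)).2) := by
      apply Prod.ext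
      · simp only [stepB]
        rw [counterB, PySem.List.length_pyRange_one]
        omega
      · simp only [stepB]
        rw [show ((c : Int) + 1) + 1 = 1 + ((c : Int) + 1) by ring]
    -- finish with the induction hypothesis on the remaining months
    rw [PySem.List.enumerate_cons, List.foldl_cons, hBmonth,
        show i0 + (((c : Int) + 1) + rest2.sum) = (i0 + ((c : Int) + 1)) + rest2.sum by ring]
    exact ih (mIdx + 1) (i0 + ((c : Int) + 1))
      (((PySem.List.pyRange 1 (1 + ((c : Int) + 1)) 1).foldl
          (stepBinner ((mIdx : Nat) : Int) off) (i0, dict)).2)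
      hrest2

-- outerAgree specialised to the start of the year, with the Nat-casts normalised
lemma outerAgree0 (md : List Int) (off : Int) (hlen : md.length = 12)
    (hpos : ∀ x ∈ md, 1 ≤ x) (dict : PySem.Dict String Int) :
    ((PySem.List.pyRange 0 (0 + md.sum) 1).foldl (stepA md off)
        ((0 : Int), 1, PySem.List.pyGetD md 0 0, dict)).2.2.2
      = ((PySem.List.enumerate md 0).foldl (stepB off) (0, dict)).2 := by
  have h := outerAgree md off hlen hpos md 0 0 dict List.drop_zero
  rw [Nat.cast_zero] at h
  exact h

-- the two loops agree for any valid 12-month table md with n = sum of md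
lemma runs_agree (md : List Int) (off : Int) (hlen : md.length = 12)
    (hpos : ∀ x ∈ md, 1 ≤ x) (n : Int) (hn : n = md.sum) :
    runA md off n = runB md off := by
  unfold runA runB
  subst hn
  have h := outerAgree0 md off hlen hpos PySem.Dict.empty
  rw [zero_add] at h
  exact congrArg PySem.Dict.items h

lemma ports_agree (year : Int) (first_day : String)
    (hpre : Pre_generate_year_calendar year first_day) :
    generate_year_calendar year first_day = generate_year_calendar_alt year first_day := by
  unfold generate_year_calendar generate_year_calendar_alt
  cases hidx : PySem.List.index?
      ["MONDAY", "TUESDAY", "WEDNESDAY", "THURSDAY", "FRIDAY", "SATURDAY", "SUNDAY"]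
      first_day with
  | none => exact absurd hpre ((PySem.List.index?_eq_none_iff _ _).mp hidx)
  | some k =>
    cases hL : is_leap_year year with
    | false =>
      exact runs_agree
        [31, if !false then 28 else 29, 31, 30, 31, 30, 31, 31, 30, 31, 30, 31]
        ((k : Int) + 1) (by decide) (by decide)
        (if false then 366 else 365) (by decide)
    | true =>
      exact runs_agree
        [31, if !true then 28 else 29, 31, 30, 31, 30, 31, 31, 30, 31, 30, 31]
        ((k : Int) + 1) (by decide) (by decide)
        (if true then 366 else 365) (by decide)

-- ===== VERDICT (by name: the statement is the Claim_ definition above) =====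
theorem generate_year_calendar_spec : Claim_equal_generate_year_calendar := by
  intro year first_day _ hpre
  unfold Spec_generate_year_calendar
  exact ports_agree year first_day hpre
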